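-- pv_equiv track=rewrite | github.com/AuburnFord/kattis | Python/iforaneye.py | convert
-- ===== SOURCE A (Python) =====
-- rel = {
-- 	'at':'@',
-- 	'and':'&',
-- 	'one':'1',
-- 	'won':'1',
-- 	'to':'2',
-- 	'too':'2',
-- 	'two':'2',
-- 	'for':'4',
-- 	'four':'4',
-- 	'bea':'b',
-- 	'be':'b',
-- 	'bee':'b',
-- 	'sea':'c',
-- 	'see':'c',
-- 	'eye':'i',
-- 	'oh':'o',
-- 	'owe':'o',
-- 	'are':'r',
-- 	'you':'u',
-- 	'why':'y'}
--
-- upper = {'b', 'c', 'i', 'o', 'r', 'u', 'y'}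
--
-- def convert(line):
-- 	out = ""
-- 	x = 0
-- 	while x < len(line):
-- 		if x <= len(line) - 4:
-- 			temp = line[x:x+4].lower()
-- 			if temp in rel:
-- 				conv = rel[temp]
-- 				out += conv
-- 				x += 4
-- 				continue
-- 		if x <= len(line) - 3:
-- 			temp = line[x:x+3].lower()
-- 			if temp in rel:
-- 				conv = rel[temp]
-- 				if line[x].isupper() and conv in upper:
-- 					conv=conv.upper()
-- 				out += conv
-- 				x += 3
-- 				continue
-- 		if x <= len(line) - 2:
-- 			temp = line[x:x+2].lower()
-- 			if temp in rel:
-- 				conv = rel[temp]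
-- 				if line[x].isupper() and conv in upper:
-- 					conv=conv.upper()
-- 				out+= conv
-- 				x+=2
-- 				continue
-- 		out+=line[x]
-- 		x += 1
-- 	return out
-- ===== SOURCE B (Python) =====
-- rel = {
-- 	'at':'@',
-- 	'and':'&',
-- 	'one':'1',
-- 	'won':'1',
-- 	'to':'2',
-- 	'too':'2',
-- 	'two':'2',
-- 	'for':'4',
-- 	'four':'4',
-- 	'bea':'b',
-- 	'be':'b',
-- 	'bee':'b',
-- 	'sea':'c',
-- 	'see':'c',
-- 	'eye':'i',
-- 	'oh':'o',
-- 	'owe':'o',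
-- 	'are':'r',
-- 	'you':'u',
-- 	'why':'y'}
--
-- upper = {'b', 'c', 'i', 'o', 'r', 'u', 'y'}
--
-- # Keys ordered longest first; leftmost match in this list = greedy longest match.
-- _keys = sorted(rel, key=len, reverse=True)
--
-- def convert(line):
-- 	low = line.lower()
-- 	parts = []
-- 	i = 0
-- 	n = len(line)
-- 	while i < n:
-- 		for w in _keys:
-- 			if low.startswith(w, i):
-- 				r = rel[w]
-- 				if line[i].isupper() and r in upper:
-- 					r = r.upper()
-- 				parts.append(r)
-- 				i += len(w)
-- 				break
-- 		else:
-- 			parts.append(line[i])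
-- 			i += 1
-- 	return "".join(parts)
-- ===== Notes on version B (the rewrite author's own statement) =====
-- stated objective: alternative
-- what changed: Replaces A's per-position chain of three fixed-width slice-and-dict-lookup attempts by one lowercase pass plus a first-match scan over the keys pre-sorted longest-first (leftmost match in that list reproduces greedy longest-match), collecting pieces in a list joined once.
import Mathlib
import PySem

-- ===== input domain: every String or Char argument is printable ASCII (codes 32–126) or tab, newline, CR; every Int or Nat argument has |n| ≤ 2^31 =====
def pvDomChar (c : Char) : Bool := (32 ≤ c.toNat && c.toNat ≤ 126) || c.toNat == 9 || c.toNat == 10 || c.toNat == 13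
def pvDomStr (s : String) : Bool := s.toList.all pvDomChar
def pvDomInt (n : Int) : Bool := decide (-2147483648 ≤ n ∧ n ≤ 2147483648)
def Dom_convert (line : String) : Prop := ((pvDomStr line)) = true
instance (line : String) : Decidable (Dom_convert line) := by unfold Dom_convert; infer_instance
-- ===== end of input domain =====

-- B replaces A's chain of three fixed-width slice-and-dict-lookup attempts per position by one
-- lowercasing pass plus a first-match scan over the keys pre-sorted longest-first (alternative
-- decomposition, same cost); return values proved equal.

-- ===== PORT A =====
-- module-level constants shared by both Python files
def pvRel : PySem.Dict (List Char) String := PySem.Dict.ofList [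
  (['a','t'], "@"), (['a','n','d'], "&"), (['o','n','e'], "1"), (['w','o','n'], "1"),
  (['t','o'], "2"), (['t','o','o'], "2"), (['t','w','o'], "2"), (['f','o','r'], "4"),
  (['f','o','u','r'], "4"), (['b','e','a'], "b"), (['b','e'], "b"), (['b','e','e'], "b"),
  (['s','e','a'], "c"), (['s','e','e'], "c"), (['e','y','e'], "i"), (['o','h'], "o"),
  (['o','w','e'], "o"), (['a','r','e'], "r"), (['y','o','u'], "u"), (['w','h','y'], "y")]

def pvUpperSet : PySem.Set String := PySem.Set.ofList ["b", "c", "i", "o", "r", "u", "y"]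

-- the snippet `if line[x].isupper() and conv in upper: conv = conv.upper()` (in both Pythons)
def pvAdjust (c : Char) (conv : String) : String :=
  if PySem.Chars.isupper c && pvUpperSet.contains conv then PySem.Str.upper conv else conv

-- `x <= len(line)-n` guard + `line[x:x+n].lower()` slice + `in rel` / `rel[temp]` lookup of A
def pvLookA (n : Nat) (s : List Char) : Option String :=
  if n ≤ s.length then PySem.Dict.get? pvRel (PySem.Chars.lower (s.take n)) else none

-- A's while-loop over the remaining suffix of the line
def pvGoA : List Char → List Char
  | [] => []
  | c :: rest =>
    match pvLookA 4 (c :: rest) with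
    | some conv => conv.toList ++ pvGoA ((c :: rest).drop 4)
    | none =>
      match pvLookA 3 (c :: rest) with
      | some conv => (pvAdjust c conv).toList ++ pvGoA ((c :: rest).drop 3)
      | none =>
        match pvLookA 2 (c :: rest) with
        | some conv => (pvAdjust c conv).toList ++ pvGoA ((c :: rest).drop 2)
        | none => c :: pvGoA rest
termination_by s => s.length
decreasing_by all_goals (simp [List.length_drop]; try omega)

def convert (line : String) : String := String.mk (pvGoA line.toList)

-- ===== PORT B =====
-- `_keys = sorted(rel, key=len, reverse=True)`
def pvKeys : List (List Char) := PySem.List.sorted pvRel.keys (fun w => w.length) true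

-- the sorted key list, written out (needed by pvGoB's termination proof)
theorem pvKeys_lit : pvKeys =
    [['f','o','u','r'], ['a','n','d'], ['o','n','e'], ['w','o','n'], ['t','o','o'], ['t','w','o'],
     ['f','o','r'], ['b','e','a'], ['b','e','e'], ['s','e','a'], ['s','e','e'], ['e','y','e'],
     ['o','w','e'], ['a','r','e'], ['y','o','u'], ['w','h','y'], ['a','t'], ['t','o'], ['b','e'],
     ['o','h']] := by decide

theorem pvKeys_len (w : List Char) (hw : w ∈ pvKeys) : 1 ≤ w.length := by
  rw [pvKeys_lit] at hw
  fin_cases hw <;> decide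

-- B's while-loop: the `line` suffix and the matching suffix of `low = line.lower()`
def pvGoB : List Char → List Char → List Char
  | [], _ => []
  | c :: rest, low =>
    match h : List.find? (fun w => PySem.Chars.startswith low w) pvKeys with
    | some w =>
        (pvAdjust c (PySem.Dict.getD pvRel w "")).toList
          ++ pvGoB ((c :: rest).drop w.length) (low.drop w.length)
    | none => c :: pvGoB rest (low.drop 1)
termination_by s _ => s.length
decreasing_by
  · have hm := pvKeys_len _ (List.mem_of_find?_eq_some h)
    simp [List.length_drop]; omega
  · simp

def convert_alt (line : String) : String :=
  String.mk (pvGoB line.toList (PySem.Chars.lower line.toList))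

-- ===== PRECONDITION & SPEC =====
def Spec_convert (line : String) (out : String) : Prop := out = convert_alt line
instance (line : String) (out : String) : Decidable (Spec_convert line out) := by unfold Spec_convert; infer_instance

-- ===== CLAIM (what is proved, stated in full; the proofs are below) =====
def Claim_equal_convert : Prop := ∀ (line : String), Dom_convert line → Spec_convert line (convert line)

-- ===== LEMMAS AND PROOFS =====

-- the length-n pairs of rel
def pvRelN (n : Nat) : List (List Char × String) :=
  pvRel.items.filter (fun p => p.1.length == n)

theorem pvRelN_len (n : Nat) : ∀ p ∈ pvRelN n, p.1.length = n := by
  intro p hp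
  have := List.of_mem_filter hp
  simpa using this

theorem pvKeys_grp : pvKeys = (pvRelN 4).map Prod.fst ++ ((pvRelN 3).map Prod.fst ++ (pvRelN 2).map Prod.fst) := by
  decide

theorem pv_lower_map (s : List Char) : PySem.Chars.lower s = s.map PySem.Chars.lowerChar := by
  simp [PySem.Chars.lower]

theorem pv_tlen {n : Nat} {s : List Char} (h : n ≤ s.length) :
    (PySem.Chars.lower (s.take n)).length = n := by
  simp [pv_lower_map]; omega

theorem pv_sw (w s : List Char) :
    PySem.Chars.startswith (PySem.Chars.lower s) w = true ↔
      w.length ≤ s.length ∧ PySem.Chars.lower (s.take w.length) = w := by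
  rw [PySem.Chars.startswith_iff]
  constructor
  · intro h
    have hl := h.length_le
    simp [pv_lower_map, List.length_map] at hl
    have hw := List.prefix_iff_eq_take.mp h
    rw [pv_lower_map] at hw
    refine ⟨hl, ?_⟩
    rw [pv_lower_map, List.map_take]
    exact hw.symm
  · rintro ⟨hl, ht⟩
    rw [← ht, pv_lower_map, pv_lower_map, List.map_take]
    exact List.take_prefix _ _

theorem pv_nodup : pvRel.keys.Nodup := by decide

theorem pv_get?_grp (t : List Char) (n : Nat) (ht : t.length = n) :
    PySem.Dict.get? pvRel t = (List.find? (fun p => p.1 == t) (pvRelN n)).map Prod.snd := by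
  cases hF : List.find? (fun p => p.1 == t) (pvRelN n) with
  | some pv =>
    have hc := List.find?_some hF
    have hmem := List.mem_of_find?_eq_some hF
    have hk : pv.1 = t := by simpa using hc
    have hitems : pv ∈ pvRel.items := List.mem_of_mem_filter hmem
    have := PySem.Dict.get?_of_mem_items (d := pvRel) (k := pv.1) (v := pv.2)
      (by simpa using hitems) pv_nodup
    rw [← hk, this]
    rfl
  | none =>
    cases hG : PySem.Dict.get? pvRel t with
    | none => rfl
    | some v =>
      exfalso
      have hitems := PySem.Dict.mem_items_of_get?_eq_some (d := pvRel) hG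
      have hmem : (t, v) ∈ pvRelN n := List.mem_filter.mpr ⟨hitems, by simp [ht]⟩
      have := List.find?_eq_none.mp hF _ hmem
      simp at this

theorem pv_findGrp (s : List Char) (n : Nat) (pairs : List (List Char × String))
    (hlen : ∀ p ∈ pairs, p.1.length = n) :
    List.find? (fun w => PySem.Chars.startswith (PySem.Chars.lower s) w) (pairs.map Prod.fst)
      = if n ≤ s.length then
          (List.find? (fun p => p.1 == PySem.Chars.lower (s.take n)) pairs).map Prod.fst
        else none := by
  induction pairs with
  | nil => simp
  | cons p rest ih =>
    have hpn : p.1.length = n := hlen p (by simp)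
    by_cases hc : PySem.Chars.startswith (PySem.Chars.lower s) p.1 = true
    · obtain ⟨h1, h2⟩ := (pv_sw _ _).mp hc
      rw [hpn] at h1 h2
      have hbe : (p.1 == PySem.Chars.lower (s.take n)) = true := by
        rw [beq_iff_eq, h2]
      simp [hc, hbe, h1]
    · rw [List.map_cons, List.find?_cons_of_neg (by simpa using hc)]
      rw [ih (fun q hq => hlen q (by simp [hq]))]
      by_cases hn : n ≤ s.length
      · have hbe : (p.1 == PySem.Chars.lower (s.take n)) = false := by
          rw [beq_eq_false_iff_ne]
          intro hEq
          apply hc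
          rw [pv_sw]
          refine ⟨by omega, ?_⟩
          rw [hpn]
          exact hEq.symm
        simp [hn, hbe]
      · simp [hn]

-- group n of B's scan behaves exactly like A's length-n attempt
theorem pv_grp (s : List Char) (n : Nat) :
    List.find? (fun w => PySem.Chars.startswith (PySem.Chars.lower s) w) ((pvRelN n).map Prod.fst)
      = (pvLookA n s).map (fun _ => PySem.Chars.lower (s.take n)) := by
  rw [pv_findGrp s n _ (pvRelN_len n)]
  unfold pvLookA
  by_cases h : n ≤ s.length
  · simp only [if_pos h]
    rw [pv_get?_grp _ n (pv_tlen h)]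
    cases hF : List.find? (fun p => p.1 == PySem.Chars.lower (s.take n)) (pvRelN n) with
    | none => simp
    | some pv =>
      have hk : pv.1 = PySem.Chars.lower (s.take n) := by simpa using List.find?_some hF
      simp [hk]
  · simp [h]

theorem pvLookA_some {n : Nat} {s : List Char} {conv : String} (h : pvLookA n s = some conv) :
    n ≤ s.length ∧ PySem.Dict.get? pvRel (PySem.Chars.lower (s.take n)) = some conv := by
  unfold pvLookA at h
  by_cases hn : n ≤ s.length
  · rw [if_pos hn] at h; exact ⟨hn, h⟩
  · rw [if_neg hn] at h; cases h

theorem pv_look4_val {s : List Char} {conv : String} (h : pvLookA 4 s = some conv) : conv = "4" := by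
  obtain ⟨hn, hg⟩ := pvLookA_some h
  have hitems := PySem.Dict.mem_items_of_get?_eq_some (d := pvRel) hg
  have hmem : (PySem.Chars.lower (s.take 4), conv) ∈ pvRelN 4 :=
    List.mem_filter.mpr ⟨hitems, by simp [pv_tlen hn]⟩
  have h4 : pvRelN 4 = [(['f','o','u','r'], "4")] := by decide
  rw [h4] at hmem
  simp at hmem
  exact hmem.2

theorem pv_adjust4 (c : Char) : pvAdjust c "4" = "4" := by
  simp only [pvAdjust]
  split
  · next h =>
      exfalso
      have h2 := (Bool.and_eq_true _ _).mp h
      exact absurd h2.2 (by decide)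
  · rfl

theorem pv_lower_drop (s : List Char) (m : Nat) :
    (PySem.Chars.lower s).drop m = PySem.Chars.lower (s.drop m) := by
  simp [pv_lower_map, List.map_drop]

-- B's whole scan, expressed through A's three attempts
theorem pv_find_keys (s : List Char) :
    List.find? (fun w => PySem.Chars.startswith (PySem.Chars.lower s) w) pvKeys
      = (((pvLookA 4 s).map (fun _ => PySem.Chars.lower (s.take 4))).or
          (((pvLookA 3 s).map (fun _ => PySem.Chars.lower (s.take 3))).or
            ((pvLookA 2 s).map (fun _ => PySem.Chars.lower (s.take 2))))) := by
  rw [pvKeys_grp, List.find?_append, List.find?_append, pv_grp, pv_grp, pv_grp]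

-- step-unfolding equations for the two loop ports
theorem pvGoA_nil : pvGoA [] = [] := by rw [pvGoA.eq_def]

theorem pvGoA_cons (c : Char) (rest : List Char) :
    pvGoA (c :: rest) = (match pvLookA 4 (c :: rest) with
      | some conv => conv.toList ++ pvGoA ((c :: rest).drop 4)
      | none => match pvLookA 3 (c :: rest) with
        | some conv => (pvAdjust c conv).toList ++ pvGoA ((c :: rest).drop 3)
        | none => match pvLookA 2 (c :: rest) with
          | some conv => (pvAdjust c conv).toList ++ pvGoA ((c :: rest).drop 2)
          | none => c :: pvGoA rest) := by
  rw [pvGoA.eq_def]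

theorem pvGoB_nil (low : List Char) : pvGoB [] low = [] := by rw [pvGoB.eq_def]

theorem pvGoB_cons_some (c : Char) (rest low w : List Char)
    (h : List.find? (fun w => PySem.Chars.startswith low w) pvKeys = some w) :
    pvGoB (c :: rest) low
      = (pvAdjust c (PySem.Dict.getD pvRel w "")).toList
          ++ pvGoB ((c :: rest).drop w.length) (low.drop w.length) := by
  rw [pvGoB.eq_def]
  split
  next _ hfo => exact absurd hfo (List.cons_ne_nil _ _)
  next _ _ c' rest' hfo =>
    injection hfo with h1 h2
    subst h1; subst h2
    split
    next w' hfi =>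
      have := h.symm.trans hfi
      injection this with h3
      subst h3
      rfl
    next hfi =>
      rw [h] at hfi
      cases hfi

theorem pvGoB_cons_none (c : Char) (rest low : List Char)
    (h : List.find? (fun w => PySem.Chars.startswith low w) pvKeys = none) :
    pvGoB (c :: rest) low = c :: pvGoB rest (low.drop 1) := by
  rw [pvGoB.eq_def]
  split
  next _ hfo => exact absurd hfo (List.cons_ne_nil _ _)
  next _ _ c' rest' hfo =>
    injection hfo with h1 h2
    subst h1; subst h2
    split
    next w' hfi =>
      rw [h] at hfi
      cases hfi
    next hfi => rfl

theorem pv_main : ∀ (N : Nat) (s : List Char), s.length ≤ N →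
    pvGoB s (PySem.Chars.lower s) = pvGoA s := by
  intro N
  induction N with
  | zero =>
    intro s hs
    have h0 : s = [] := List.length_eq_zero_iff.mp (Nat.le_zero.mp hs)
    subst h0
    rw [pvGoB_nil, pvGoA_nil]
  | succ N ih =>
    intro s hs
    match s with
    | [] => rw [pvGoB_nil, pvGoA_nil]
    | c :: rest =>
      have hs' : rest.length ≤ N := by simpa using hs
      have hB := pv_find_keys (c :: rest)
      cases h4 : pvLookA 4 (c :: rest) with
      | some conv =>
        obtain ⟨hn, hg⟩ := pvLookA_some h4
        rw [h4] at hB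
        simp only [Option.map_some] at hB
        rw [pvGoB_cons_some _ _ _ _ hB, pvGoA_cons]
        simp only [h4]
        rw [PySem.Dict.getD_of_get?_eq_some _ _ hg, pv_look4_val h4, pv_adjust4,
          pv_tlen hn, pv_lower_drop]
        have hlen : ((c :: rest).drop 4).length ≤ N := by
          simp; omega
        rw [ih _ hlen]
      | none =>
        rw [h4] at hB
        simp only [Option.map_none, Option.none_or] at hB
        cases h3 : pvLookA 3 (c :: rest) with
        | some conv =>
          obtain ⟨hn, hg⟩ := pvLookA_some h3
          rw [h3] at hB
          simp only [Option.map_some] at hB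
          rw [pvGoB_cons_some _ _ _ _ hB, pvGoA_cons]
          simp only [h4, h3]
          rw [PySem.Dict.getD_of_get?_eq_some _ _ hg, pv_tlen hn, pv_lower_drop]
          have hlen : ((c :: rest).drop 3).length ≤ N := by
            simp [List.length_drop]; omega
          rw [ih _ hlen]
        | none =>
          rw [h3] at hB
          simp only [Option.map_none, Option.none_or] at hB
          cases h2 : pvLookA 2 (c :: rest) with
          | some conv =>
            obtain ⟨hn, hg⟩ := pvLookA_some h2
            rw [h2] at hB
            simp only [Option.map_some] at hB
            rw [pvGoB_cons_some _ _ _ _ hB, pvGoA_cons]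
            simp only [h4, h3, h2]
            rw [PySem.Dict.getD_of_get?_eq_some _ _ hg, pv_tlen hn, pv_lower_drop]
            have hlen : ((c :: rest).drop 2).length ≤ N := by
              simp; omega
            rw [ih _ hlen]
          | none =>
            rw [h2] at hB
            simp only [Option.map_none] at hB
            rw [pvGoB_cons_none _ _ _ hB, pvGoA_cons]
            simp only [h4, h3, h2]
            have hd1 : (PySem.Chars.lower (c :: rest)).drop 1 = PySem.Chars.lower rest := by
              rw [pv_lower_drop]
              rfl
            rw [hd1, ih _ hs']

-- ===== VERDICT (by name: the statement is the Claim_ definition above) =====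
theorem convert_spec : Claim_equal_convert := by
  intro line _
  unfold Spec_convert convert convert_alt
  rw [pv_main line.toList.length line.toList (le_refl _)]
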